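-- pv_equiv track=rewrite | github.com/elice-02-study-01-algorithm/python | SH_Noh/programmers/2번.py | solution
-- ===== SOURCE A (Python) =====
-- def solution(want, number, discount):
--     answer = 0
--     # needs = { name: value for name, value in zip(want, number) }
--     for day in range(len(discount) - 9):
--         start = day
--         end = day + 10
--         needs = { name: value for name, value in zip(want, number) }
--         for i in range(start, end):
--             today_product = discount[i]
--             if today_product in needs:
--                 if needs[today_product] > 0:
--                     needs[today_product] -= 1
--
--         # 0만 있는지 확인
--         result = set(needs.values())
--         if len(result) == 1 and 0 in result:
--             answer += 1
--
--     return answer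
-- ===== SOURCE B (Python) =====
-- def solution(want, number, discount):
--     n = len(discount)
--     if n < 10:
--         return 0
--     needs = dict(zip(want, number))
--     total = len(needs)
--     cnt = {}
--     satisfied = sum(1 for v in needs.values() if v == 0)
--     for item in discount[:10]:
--         c = cnt.get(item, 0) + 1
--         cnt[item] = c
--         if needs.get(item) == c:
--             satisfied += 1
--     answer = 1 if satisfied == total else 0
--     for day in range(1, n - 9):
--         out = discount[day - 1]
--         c = cnt.get(out, 0) - 1
--         cnt[out] = c
--         if needs.get(out) == c + 1:
--             satisfied -= 1
--         inc = discount[day + 9]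
--         c = cnt.get(inc, 0) + 1
--         cnt[inc] = c
--         if needs.get(inc) == c:
--             satisfied += 1
--         if satisfied == total:
--             answer += 1
--     return answer
-- ===== Notes on version B (the rewrite author's own statement) =====
-- stated objective: faster
-- what changed: B replaces A's per-window rebuild of the needs dict and 10-step decrement scan by a single sliding frequency counter over the discount list with an incrementally maintained count of satisfied wanted items, so each new window costs O(1) instead of O(W).
-- outside the precondition, e.g. on solution([], [1], ['a', 'a', 'a', 'a', 'a', 'a', 'a', 'a', 'a', 'a', 'a', 'a']): A returns 0, B returns 3
import Mathlib
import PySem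

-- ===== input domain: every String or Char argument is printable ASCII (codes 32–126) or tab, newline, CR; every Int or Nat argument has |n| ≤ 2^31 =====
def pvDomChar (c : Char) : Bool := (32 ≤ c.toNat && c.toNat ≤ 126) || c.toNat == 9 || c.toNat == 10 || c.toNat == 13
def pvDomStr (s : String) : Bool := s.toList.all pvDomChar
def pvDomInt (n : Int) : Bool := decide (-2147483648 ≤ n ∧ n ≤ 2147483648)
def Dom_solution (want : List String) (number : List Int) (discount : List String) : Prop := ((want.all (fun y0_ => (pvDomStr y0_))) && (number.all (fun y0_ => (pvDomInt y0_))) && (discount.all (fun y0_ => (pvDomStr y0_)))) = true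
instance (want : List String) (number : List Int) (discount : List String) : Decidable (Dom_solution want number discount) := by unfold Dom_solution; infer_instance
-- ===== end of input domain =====

-- B replaces A's per-window dict rebuild and 10-step decrement with one sliding frequency
-- counter and an incrementally maintained count of satisfied wanted items (objective: faster).

-- needs = { name: value for name, value in zip(want, number) }  (identical line in both Pythons)
def needsOf (want : List String) (number : List Int) : PySem.Dict String Int :=
  (want.zip number).foldl (fun d p => d.insert p.1 p.2) PySem.Dict.empty

-- ===== PORT A =====
def solution (want : List String) (number : List Int) (discount : List String) : Int :=
  (PySem.List.pyRange 0 ((discount.length : Int) - 9) 1).foldl (fun answer day =>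
    let start := day
    let stop := day + 10
    let needs := needsOf want number
    let needs := (PySem.List.pyRange start stop 1).foldl (fun needs i =>
      let today := PySem.List.pyGetD discount i ""
      if needs.contains today then
        (if needs.getD today 0 > 0 then needs.insert today (needs.getD today 0 - 1) else needs)
      else needs) needs
    let result : PySem.Set Int := PySem.Set.ofList needs.values
    if result.length = 1 ∧ (0 : Int) ∈ result then answer + 1 else answer) 0

-- ===== PORT B =====
def solution_alt (want : List String) (number : List Int) (discount : List String) : Int :=
  let n : Int := discount.length
  if n < 10 then 0 else
  let needs := needsOf want number
  let total : Int := needs.size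
  -- build the counter of the first window, maintaining `satisfied` on the way
  let st : PySem.Dict String Int × Int :=
    (PySem.List.slice discount none (some 10)).foldl
      (fun st item =>
        let c := st.1.getD item 0 + 1
        let cnt := st.1.insert item c
        if needs.get? item = some c then (cnt, st.2 + 1) else (cnt, st.2))
      (PySem.Dict.empty, (needs.values.countP (fun v => v == 0) : Int))
  let answer : Int := if st.2 = total then 1 else 0
  -- slide the window once per further day
  let fin :=
    (PySem.List.pyRange 1 (n - 9) 1).foldl
      (fun (st : (PySem.Dict String Int × Int) × Int) day =>
        let cnt := st.1.1
        let o := PySem.List.pyGetD discount (day - 1) ""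
        let c := cnt.getD o 0 - 1
        let cnt := cnt.insert o c
        let sat := if needs.get? o = some (c + 1) then st.1.2 - 1 else st.1.2
        let t := PySem.List.pyGetD discount (day + 9) ""
        let c2 := cnt.getD t 0 + 1
        let cnt := cnt.insert t c2
        let sat := if needs.get? t = some c2 then sat + 1 else sat
        ((cnt, sat), if sat = total then st.2 + 1 else st.2))
      ((st.1, st.2), answer)
  fin.2

-- ===== PRECONDITION & SPEC =====
-- Pre_ excludes inputs where dict(zip(want, number)) is empty (want or number empty) while at
-- least one 10-day window exists: there A counts no window (an empty set of values is never {0})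
-- while B's vacuous all-items check counts every window — both readings of "no wanted items" are
-- defensible, the corner accidental.
def Pre_solution (want : List String) (number : List Int) (discount : List String) : Prop :=
  (want ≠ [] ∧ number ≠ []) ∨ discount.length < 10
instance (want : List String) (number : List Int) (discount : List String) : Decidable (Pre_solution want number discount) := by unfold Pre_solution; infer_instance
def pvWitness_solution : List String × List Int × List String :=
  (["a"], [1], ["a", "b", "a", "b", "a", "b", "a", "b", "a", "b"])

def Spec_solution (want : List String) (number : List Int) (discount : List String) (out : Int) : Prop := out = solution_alt want number discount
instance (want : List String) (number : List Int) (discount : List String) (out : Int) : Decidable (Spec_solution want number discount out) := by unfold Spec_solution; infer_instance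

-- ===== CLAIM (what is proved, stated in full; the proofs are below) =====
def Claim_equal_solution : Prop := ∀ (want : List String) (number : List Int) (discount : List String), Dom_solution want number discount → Pre_solution want number discount → Spec_solution want number discount (solution want number discount)

-- ===== LEMMAS AND PROOFS =====

-- proof-side names for the loop bodies of the two ports
def stepA (d : PySem.Dict String Int) (today : String) : PySem.Dict String Int :=
  if d.contains today then
    (if d.getD today 0 > 0 then d.insert today (d.getD today 0 - 1) else d)
  else d

def stepB (needs : PySem.Dict String Int) (st : PySem.Dict String Int × Int) (item : String) :
    PySem.Dict String Int × Int :=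
  let c := st.1.getD item 0 + 1
  let cnt := st.1.insert item c
  if needs.get? item = some c then (cnt, st.2 + 1) else (cnt, st.2)

def stepM (needs : PySem.Dict String Int) (total : Int) (discount : List String)
    (st : (PySem.Dict String Int × Int) × Int) (day : Int) :
    (PySem.Dict String Int × Int) × Int :=
  let cnt := st.1.1
  let o := PySem.List.pyGetD discount (day - 1) ""
  let c := cnt.getD o 0 - 1
  let cnt := cnt.insert o c
  let sat := if needs.get? o = some (c + 1) then st.1.2 - 1 else st.1.2
  let t := PySem.List.pyGetD discount (day + 9) ""
  let c2 := cnt.getD t 0 + 1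
  let cnt := cnt.insert t c2
  let sat := if needs.get? t = some c2 then sat + 1 else sat
  ((cnt, sat), if sat = total then st.2 + 1 else st.2)

-- the 10-day window starting at (integer) day d, and the number of satisfied wanted items in it
def winI (discount : List String) (d : Int) : List String := (discount.drop d.toNat).take 10

def satW (needs : PySem.Dict String Int) (w : List String) : Nat :=
  needs.items.countP (fun kv => decide (0 ≤ kv.2 ∧ kv.2 ≤ (w.count kv.1 : Int)))

def goodDay (needs : PySem.Dict String Int) (discount : List String) (day : Int) : Bool :=
  satW needs (winI discount day) == needs.items.length

theorem stepA_get? (d : PySem.Dict String Int) (t k : String) :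
    (stepA d t).get? k = if k = t then (d.get? t).map (fun v => if v > 0 then v - 1 else v) else d.get? k := by
  unfold stepA
  cases h : d.get? t with
  | none =>
    have hc : d.contains t = false := by
      rw [PySem.Dict.contains_eq_isSome_get?, h]; rfl
    simp [hc]
    intro hk; subst hk; exact h.symm ▸ rfl
  | some v =>
    have hc : d.contains t = true := by
      rw [PySem.Dict.contains_eq_isSome_get?, h]; rfl
    have hg : d.getD t 0 = v := PySem.Dict.getD_of_get?_eq_some d 0 h
    simp only [hc, if_true, hg]
    by_cases hv : v > 0
    · simp only [hv, if_true, PySem.Dict.get?_insert]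
      by_cases hk : k = t <;> simp [hk, h]
      exact hv
    · simp only [hv, if_false]
      by_cases hk : k = t <;> simp [hk, h]
      omega

theorem foldA_get? (w : List String) (d : PySem.Dict String Int) (k : String) :
    (w.foldl stepA d).get? k = (d.get? k).map (fun v => max (v - (w.count k : Int)) (min v 0)) := by
  induction w generalizing d with
  | nil => cases h : d.get? k <;> simp [h] <;> omega
  | cons t w ih =>
    simp only [List.foldl_cons, ih, stepA_get?]
    by_cases hk : k = t
    · subst hk
      cases h : d.get? k with
      | none => simp
      | some v =>
        simp only [Option.map_some, List.count_cons, BEq.rfl, if_true]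
        congr 1
        push_cast
        by_cases hv : v > 0 <;> simp [hv] <;> omega
    · have hk' : ¬ t = k := fun hh => hk hh.symm
      have hcc : (t :: w).count k = w.count k := by
        simp [List.count_cons, hk']
      simp [hk, hcc]

theorem foldA_keys (w : List String) (d : PySem.Dict String Int) :
    (w.foldl stepA d).keys = d.keys := by
  induction w generalizing d with
  | nil => rfl
  | cons t w ih =>
    rw [List.foldl_cons, ih]
    unfold stepA
    by_cases hc : d.contains t
    · simp only [hc, if_true]
      by_cases hv : d.getD t 0 > 0
      · simp [hv, PySem.Dict.keys_insert_of_contains (h := hc)]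
      · simp [hv]
    · simp [hc]

theorem set_all_zero (l : List Int) :
    ((PySem.Set.ofList l).length = 1 ∧ (0:Int) ∈ PySem.Set.ofList l) ↔ (l ≠ [] ∧ ∀ v ∈ l, v = 0) := by
  constructor
  · rintro ⟨h1, h0⟩
    obtain ⟨z, hz⟩ := List.length_eq_one_iff.mp h1
    rw [hz] at h0
    have hz0 : z = 0 := by
      have h' : (0:Int) = z := by simpa using h0
      omega
    constructor
    · intro hnil; subst hnil; simp [PySem.Set.ofList] at hz
    · intro v hv
      have : v ∈ PySem.Set.ofList l := (PySem.Set.mem_ofList _ _).mpr hv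
      rw [hz] at this; simpa [hz0] using this
  · rintro ⟨hne, hall⟩
    have h0l : (0:Int) ∈ l := by
      cases l with
      | nil => exact absurd rfl hne
      | cons x xs => have := hall x (by simp); simp [← this]
    have h0 : (0:Int) ∈ PySem.Set.ofList l := (PySem.Set.mem_ofList _ _).mpr h0l
    have hsub : ∀ v ∈ PySem.Set.ofList l, v = 0 := by
      intro v hv; exact hall v ((PySem.Set.mem_ofList _ _).mp hv)
    have hnd := PySem.Set.nodup_ofList (xs := l)
    refine ⟨?_, h0⟩
    cases hS : PySem.Set.ofList l with
    | nil => rw [hS] at h0; simp at h0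
    | cons x xs =>
      cases xs with
      | nil => rfl
      | cons y ys =>
        exfalso
        rw [hS] at hsub hnd
        have hx := hsub x (by simp)
        have hy := hsub y (by simp)
        rw [List.nodup_cons] at hnd
        exact hnd.1 (by simp [hx, hy])

theorem windowA_iff (d : PySem.Dict String Int) (hnd : d.keys.Nodup) (w : List String) :
    ((PySem.Set.ofList (w.foldl stepA d).values).length = 1 ∧ (0:Int) ∈ PySem.Set.ofList (w.foldl stepA d).values)
    ↔ (d.keys ≠ [] ∧ ∀ kv ∈ d.items, 0 ≤ kv.2 ∧ kv.2 ≤ (w.count kv.1 : Int)) := by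
  rw [set_all_zero]
  have hk := foldA_keys w d
  have hnd' : (w.foldl stepA d).keys.Nodup := by rw [hk]; exact hnd
  have hv : (w.foldl stepA d).values = (w.foldl stepA d).keys.map (fun k => (w.foldl stepA d).getD k 0) :=
    PySem.Dict.values_eq_map_keys _ hnd' 0
  have hi : d.items = d.keys.map (fun k => (k, d.getD k 0)) :=
    PySem.Dict.items_eq_map_keys d hnd 0
  rw [hv, hk]
  constructor
  · rintro ⟨hne, hall⟩
    refine ⟨by simpa using hne, ?_⟩
    rw [hi]
    intro kv hkv
    obtain ⟨k, hkmem, rfl⟩ := List.mem_map.mp hkv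
    have h0 := hall _ (List.mem_map.mpr ⟨k, hkmem, rfl⟩)
    have hsome : ∃ v, d.get? k = some v := by
      cases hg : d.get? k with
      | none => exact absurd hkmem ((PySem.Dict.get?_eq_none_iff_not_mem_keys _ _).mp hg)
      | some v => exact ⟨v, rfl⟩
    obtain ⟨v, hg⟩ := hsome
    have hgd : d.getD k 0 = v := PySem.Dict.getD_of_get?_eq_some d 0 hg
    rw [PySem.Dict.getD_eq_get?_getD, foldA_get?, hg] at h0
    simp only [Option.map_some, Option.getD_some] at h0
    simp only [hgd]
    constructor <;> omega
  · rintro ⟨hne, hall⟩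
    refine ⟨by simpa using hne, ?_⟩
    intro v hv'
    obtain ⟨k, hkmem, rfl⟩ := List.mem_map.mp hv'
    have hsome : ∃ v, d.get? k = some v := by
      cases hg : d.get? k with
      | none => exact absurd hkmem ((PySem.Dict.get?_eq_none_iff_not_mem_keys _ _).mp hg)
      | some v => exact ⟨v, rfl⟩
    obtain ⟨v, hg⟩ := hsome
    have hgd : d.getD k 0 = v := PySem.Dict.getD_of_get?_eq_some d 0 hg
    have h0 := hall (k, d.getD k 0) (by rw [hi]; exact List.mem_map.mpr ⟨k, hkmem, rfl⟩)
    simp only [hgd] at h0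
    rw [PySem.Dict.getD_eq_get?_getD, foldA_get?, hg]
    simp only [Option.map_some, Option.getD_some]
    omega

theorem countP_bump (l : List (String × Int)) (hnd : (l.map Prod.fst).Nodup)
    (c c' : String → Int) (t : String) (hpos : 0 ≤ c t)
    (hc : ∀ k, c' k = if k = t then c k + 1 else c k) :
    (l.countP (fun kv => decide (0 ≤ kv.2 ∧ kv.2 ≤ c' kv.1)) : Int)
      = (l.countP (fun kv => decide (0 ≤ kv.2 ∧ kv.2 ≤ c kv.1)) : Int)
        + (if (t, c t + 1) ∈ l then 1 else 0) := by
  induction l with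
  | nil => simp
  | cons kv l ih =>
    obtain ⟨k, v⟩ := kv
    rw [List.map_cons, List.nodup_cons] at hnd
    by_cases hk : k = t
    · subst hk
      have hnotin : ∀ kv' ∈ l, kv'.1 ≠ k := by
        intro kv' h' heq
        exact hnd.1 (heq ▸ List.mem_map.mpr ⟨kv', h', rfl⟩)
      have htail : l.countP (fun kv => decide (0 ≤ kv.2 ∧ kv.2 ≤ c' kv.1))
          = l.countP (fun kv => decide (0 ≤ kv.2 ∧ kv.2 ≤ c kv.1)) := by
        apply List.countP_congr
        intro kv' h'
        have := hnotin kv' h'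
        simp [hc kv'.1, this]
      have hmem : ((k, c k + 1) ∈ l) = False := by
        simp only [eq_iff_iff, iff_false]
        intro h'
        exact hnotin _ h' rfl
      simp only [List.countP_cons, htail, List.mem_cons, hmem, or_false]
      have hck : c' k = c k + 1 := by simp [hc k]
      by_cases hv : v = c k + 1
      · subst hv
        have l1 : (decide (0 ≤ c k + 1 ∧ c k + 1 ≤ c' k)) = true := by
          simp [hck]; omega
        have l2 : (decide (0 ≤ c k + 1 ∧ c k + 1 ≤ c k)) = false := by
          simp only [decide_eq_false_iff_not]; omega
        simp only [l1, l2, Prod.mk.injEq, true_and]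
        push_cast
        omega
      · have heq : (decide (0 ≤ v ∧ v ≤ c' k)) = (decide (0 ≤ v ∧ v ≤ c k)) := by
          rw [hck]
          by_cases h1 : 0 ≤ v ∧ v ≤ c k
          · simp [h1.1, h1.2]; omega
          · rcases not_and_or.mp h1 with h2 | h2
            · simp [h2]
            · have : ¬ v ≤ c k + 1 := by omega
              simp [h2, this]
        have hne : ((k, v) = (k, c k + 1)) = False := by simp [hv]
        simp only [heq, hne, if_false, Prod.mk.injEq, true_and, hv]
        push_cast
        omega
    · have hne : ((t, c t + 1) = (k, v)) = False := by
        simp only [eq_iff_iff, iff_false, Prod.mk.injEq, not_and]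
        intro h; exact absurd h.symm hk
      have hhead : (decide (0 ≤ v ∧ v ≤ c' k)) = (decide (0 ≤ v ∧ v ≤ c k)) := by
        simp [hc k, hk]
      have := ih hnd.2
      simp only [List.countP_cons, List.mem_cons, hhead]
      simp only [hne, false_or]
      push_cast
      omega

theorem mapWinAux (m j : Nat) (xs : List String) (h : j + m ≤ xs.length) :
    (List.range m).map (fun (k : Nat) => PySem.List.pyGetD xs ((j : Int) + (k : Int)) "") = (xs.drop j).take m := by
  induction m with
  | zero => simp
  | succ m ih =>
    rw [List.range_succ, List.map_append, ih (by omega)]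
    have hjm : j + m < xs.length := by omega
    have h1 : PySem.List.pyGetD xs ((j : Int) + (m : Int)) "" = xs[j + m] := by
      have := PySem.List.pyGetD_natCast (xs := xs) (n := j + m) (d := "")
      push_cast at this
      rw [this]
      exact List.getD_eq_getElem xs "" hjm
    have h2 : (xs.drop j).take (m + 1) = (xs.drop j).take m ++ [xs[j + m]] := by
      rw [List.take_succ]
      have hlen : m < (xs.drop j).length := by simp [List.length_drop]; omega
      have : (xs.drop j)[m]? = some xs[j + m] := by
        rw [List.getElem?_eq_getElem hlen]
        congr 1
        simp [List.getElem_drop]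
      simp [this]
    rw [h2]
    simp [h1]

theorem mapWin (xs : List String) (a : Int) (h0 : 0 ≤ a) (h1 : a + 10 ≤ (xs.length : Int)) :
    (PySem.List.pyRange a (a + 10) 1).map (fun i => PySem.List.pyGetD xs i "") = winI xs a := by
  rw [PySem.List.pyRange_one, List.map_map]
  have hd : (a + 10 - a).toNat = 10 := by omega
  rw [hd]
  have ha : a = ((a.toNat : Nat) : Int) := by omega
  have := mapWinAux 10 a.toNat xs (by omega)
  rw [winI]
  rw [← this]
  apply List.map_congr_left
  intro k hk
  simp only [Function.comp_apply]
  rw [ha]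
  simp

theorem needs_keys_nodup (want : List String) (number : List Int) :
    (needsOf want number).keys.Nodup := by
  unfold needsOf
  exact PySem.Dict.nodup_keys_foldl_insert_key (want.zip number) Prod.fst (fun d p => p.2)
    PySem.Dict.empty PySem.Dict.nodup_keys_empty

theorem set_foldl_add_ne_nil (xs : List String) (s : List String) (hs : s ≠ []) :
    xs.foldl PySem.Set.add s ≠ [] := by
  induction xs generalizing s with
  | nil => exact hs
  | cons x xs ih =>
    rw [List.foldl_cons]
    apply ih
    unfold PySem.Set.add
    split
    · exact hs
    · simp

theorem needs_keys_ne (want : List String) (number : List Int)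
    (hw : want ≠ []) (hn : number ≠ []) : (needsOf want number).keys ≠ [] := by
  unfold needsOf
  rw [PySem.Dict.keys_foldl_insert_key]
  obtain ⟨w0, wr, rfl⟩ := List.exists_cons_of_ne_nil hw
  obtain ⟨n0, nr, rfl⟩ := List.exists_cons_of_ne_nil hn
  simp only [List.zip_cons_cons, List.map_cons]
  unfold PySem.Set.update
  rw [List.foldl_cons]
  apply set_foldl_add_ne_nil
  simp [PySem.Dict.keys_empty, PySem.Set.add, PySem.Set.contains]

theorem initfold (needs : PySem.Dict String Int) (hk : needs.keys.Nodup) :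
    ∀ (ext w0 : List String) (cnt : PySem.Dict String Int) (sat : Int),
    (∀ k, cnt.getD k 0 = (w0.count k : Int)) → sat = (satW needs w0 : Int) →
    (∀ k, (ext.foldl (stepB needs) (cnt, sat)).1.getD k 0 = ((w0 ++ ext).count k : Int)) ∧
    (ext.foldl (stepB needs) (cnt, sat)).2 = (satW needs (w0 ++ ext) : Int) := by
  have hnd : (needs.items.map Prod.fst).Nodup := by simpa [PySem.Dict.keys] using hk
  intro ext
  induction ext with
  | nil => intro w0 cnt sat hinv hsat; simpa using ⟨hinv, hsat⟩
  | cons t ext ih =>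
    intro w0 cnt sat hinv hsat
    rw [List.foldl_cons]
    have hstep : stepB needs (cnt, sat) t =
        (cnt.insert t (cnt.getD t 0 + 1),
         if needs.get? t = some (cnt.getD t 0 + 1) then sat + 1 else sat) := by
      by_cases h : needs.get? t = some (cnt.getD t 0 + 1) <;> simp [stepB, h]
    rw [hstep]
    have hinv' : ∀ k, (cnt.insert t (cnt.getD t 0 + 1)).getD k 0 = (((w0 ++ [t]).count k : Nat) : Int) := by
      intro k
      rw [PySem.Dict.getD_insert]
      by_cases hkt : k = t
      · subst hkt; simp [hinv k, List.count_append]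
      · have ht' : ¬ t = k := Ne.symm hkt
        simp [hkt, hinv k, List.count_append, List.count_singleton, ht']
    have hc : ∀ k, (((w0 ++ [t]).count k : Nat) : Int) = if k = t then (w0.count k : Int) + 1 else (w0.count k : Int) := by
      intro k
      by_cases hkt : k = t
      · subst hkt; simp [List.count_append]
      · have ht' : ¬ t = k := Ne.symm hkt
        simp [List.count_append, List.count_singleton, hkt, ht']
    have hbump := countP_bump needs.items hnd (fun k => (w0.count k : Int))
        (fun k => (((w0 ++ [t]).count k : Nat) : Int)) t (by positivity) hc
    beta_reduce at hbump
    have hmemiff : (needs.get? t = some ((w0.count t : Int) + 1)) ↔ ((t, (w0.count t : Int) + 1) ∈ needs.items) :=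
      PySem.Dict.get?_eq_some_iff_mem_items _ _ _ hk
    have hsat' : (if needs.get? t = some (cnt.getD t 0 + 1) then sat + 1 else sat)
        = (satW needs (w0 ++ [t]) : Int) := by
      rw [hinv t] at hstep ⊢
      unfold satW at hsat ⊢
      by_cases hmem : (t, (w0.count t : Int) + 1) ∈ needs.items
      · rw [if_pos (hmemiff.mpr hmem), hsat]
        rw [if_pos hmem] at hbump
        omega
      · rw [if_neg (fun hh => hmem (hmemiff.mp hh)), hsat]
        rw [if_neg hmem] at hbump
        omega
    have := ih (w0 ++ [t]) _ _ hinv' hsat'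
    simpa using this

theorem winA_decomp (discount : List String) (a : Int) (h1 : 1 ≤ a) (h2 : a + 9 ≤ (discount.length : Int)) :
    winI discount (a - 1) = PySem.List.pyGetD discount (a - 1) "" :: (discount.drop a.toNat).take 9 := by
  have hj : (a - 1).toNat < discount.length := by omega
  have h0' : 0 ≤ a - 1 := by omega
  have h1' : a - 1 < (discount.length : Int) := by omega
  have hg : PySem.List.pyGetD discount (a - 1) "" = discount[(a - 1).toNat] :=
    PySem.List.pyGetD_eq_getElem _ _ h0' h1'
  unfold winI
  rw [List.drop_eq_getElem_cons hj, hg]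
  rw [show (a - 1).toNat + 1 = a.toNat from by omega]
  rfl

theorem winB_decomp (discount : List String) (a : Int) (h1 : 0 ≤ a) (h2 : a + 10 ≤ (discount.length : Int)) :
    winI discount a = (discount.drop a.toNat).take 9 ++ [PySem.List.pyGetD discount (a + 9) ""] := by
  have hlen : 9 < (discount.drop a.toNat).length := by
    rw [List.length_drop]; omega
  have h0' : 0 ≤ a + 9 := by omega
  have h1' : a + 9 < (discount.length : Int) := by omega
  have h9 : (a + 9).toNat = a.toNat + 9 := by omega
  have hg : PySem.List.pyGetD discount (a + 9) "" = discount[a.toNat + 9] := by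
    rw [PySem.List.pyGetD_eq_getElem _ _ h0' h1']
    simp only [h9]
  unfold winI
  rw [show (10 : Nat) = 9 + 1 from rfl, List.take_succ, List.getElem?_eq_getElem hlen]
  rw [hg]
  simp [List.getElem_drop]

theorem mainloop (needs : PySem.Dict String Int) (hk : needs.keys.Nodup)
    (discount : List String) (total : Int) (htot : total = (needs.items.length : Int)) :
    ∀ (m : Nat) (a : Int), 1 ≤ a → a + m = (discount.length : Int) - 9 →
    ∀ (cnt : PySem.Dict String Int) (sat ans : Int),
    (∀ k, cnt.getD k 0 = ((winI discount (a - 1)).count k : Int)) →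
    sat = (satW needs (winI discount (a - 1)) : Int) →
    ((PySem.List.pyRange a ((discount.length : Int) - 9) 1).foldl (stepM needs total discount) ((cnt, sat), ans)).2
      = ans + (((PySem.List.pyRange a ((discount.length : Int) - 9) 1).countP (goodDay needs discount) : Nat) : Int) := by
  have hnd : (needs.items.map Prod.fst).Nodup := by simpa [PySem.Dict.keys] using hk
  intro m
  induction m with
  | zero =>
    intro a ha hab cnt sat ans hinv hsat
    rw [PySem.List.pyRange_one_eq_nil (by omega)]
    simp
  | succ m ih =>
    intro a ha hab cnt sat ans hinv hsat
    have hm : (m : Int) ≥ 0 := by positivity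
    have hab' : a + 1 + (m : Int) = (discount.length : Int) - 9 := by push_cast at hab ⊢; omega
    have halt : a < (discount.length : Int) - 9 := by push_cast at hab; omega
    rw [PySem.List.pyRange_one_cons halt, List.foldl_cons, List.countP_cons]
    -- window decompositions
    set o := PySem.List.pyGetD discount (a - 1) "" with ho
    set t := PySem.List.pyGetD discount (a + 9) "" with ht
    set mid := (discount.drop a.toNat).take 9 with hmid
    have hWA : winI discount (a - 1) = o :: mid := winA_decomp discount a ha (by omega)
    have hWB : winI discount a = mid ++ [t] := winB_decomp discount a (by omega) (by omega)
    have hco : cnt.getD o 0 = (mid.count o : Int) + 1 := by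
      rw [hinv o, hWA]; simp [List.count_cons]
    -- evaluate one step
    have hstep : stepM needs total discount ((cnt, sat), ans) a =
        (((cnt.insert o (cnt.getD o 0 - 1)).insert t ((cnt.insert o (cnt.getD o 0 - 1)).getD t 0 + 1),
          (if needs.get? t = some ((cnt.insert o (cnt.getD o 0 - 1)).getD t 0 + 1)
            then (if needs.get? o = some ((cnt.getD o 0 - 1) + 1) then sat - 1 else sat) + 1
            else (if needs.get? o = some ((cnt.getD o 0 - 1) + 1) then sat - 1 else sat))),
         (if (if needs.get? t = some ((cnt.insert o (cnt.getD o 0 - 1)).getD t 0 + 1)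
            then (if needs.get? o = some ((cnt.getD o 0 - 1) + 1) then sat - 1 else sat) + 1
            else (if needs.get? o = some ((cnt.getD o 0 - 1) + 1) then sat - 1 else sat)) = total
          then ans + 1 else ans)) := by
      unfold stepM
      rfl
    rw [hstep]
    -- the removed-element update
    have hmido : ∀ k, (cnt.insert o (cnt.getD o 0 - 1)).getD k 0 = (mid.count k : Int) := by
      intro k
      rw [PySem.Dict.getD_insert]
      by_cases hko : k = o
      · subst hko; simp [hco]
      · simp only [hko, if_false]
        rw [hinv k, hWA]
        have ho' : ¬ o = k := Ne.symm hko
        simp [List.count_cons, ho']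
    have hbump1 := countP_bump needs.items hnd (fun k => (mid.count k : Int))
        (fun k => (((o :: mid).count k : Nat) : Int)) o (by positivity)
        (by intro k
            by_cases hko : k = o
            · subst hko; simp [List.count_cons]
            · have ho' : ¬ o = k := Ne.symm hko
              simp [List.count_cons, hko, ho'])
    beta_reduce at hbump1
    have hmemiff1 : (needs.get? o = some ((mid.count o : Int) + 1)) ↔ ((o, (mid.count o : Int) + 1) ∈ needs.items) :=
      PySem.Dict.get?_eq_some_iff_mem_items _ _ _ hk
    have hsat1 : (if needs.get? o = some ((cnt.getD o 0 - 1) + 1) then sat - 1 else sat)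
        = (satW needs mid : Int) := by
      have hc1 : (cnt.getD o 0 - 1) + 1 = (mid.count o : Int) + 1 := by omega
      rw [hc1, hsat, hWA]
      unfold satW
      by_cases hmem : (o, (mid.count o : Int) + 1) ∈ needs.items
      · rw [if_pos (hmemiff1.mpr hmem)]
        rw [if_pos hmem] at hbump1
        omega
      · rw [if_neg (fun hh => hmem (hmemiff1.mp hh))]
        rw [if_neg hmem] at hbump1
        omega
    have hbump2 := countP_bump needs.items hnd (fun k => (mid.count k : Int))
        (fun k => (((mid ++ [t]).count k : Nat) : Int)) t (by positivity)
        (by intro k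
            by_cases hkt : k = t
            · subst hkt; simp [List.count_append]
            · have ht' : ¬ t = k := Ne.symm hkt
              simp [List.count_append, List.count_singleton, hkt, ht'])
    beta_reduce at hbump2
    have hmemiff2 : (needs.get? t = some ((mid.count t : Int) + 1)) ↔ ((t, (mid.count t : Int) + 1) ∈ needs.items) :=
      PySem.Dict.get?_eq_some_iff_mem_items _ _ _ hk
    have hsat2 : (if needs.get? t = some ((cnt.insert o (cnt.getD o 0 - 1)).getD t 0 + 1)
          then (if needs.get? o = some ((cnt.getD o 0 - 1) + 1) then sat - 1 else sat) + 1
          else (if needs.get? o = some ((cnt.getD o 0 - 1) + 1) then sat - 1 else sat))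
        = (satW needs (winI discount a) : Int) := by
      rw [hsat1, hmido t, hWB]
      unfold satW
      by_cases hmem : (t, (mid.count t : Int) + 1) ∈ needs.items
      · rw [if_pos (hmemiff2.mpr hmem)]
        rw [if_pos hmem] at hbump2
        omega
      · rw [if_neg (fun hh => hmem (hmemiff2.mp hh))]
        rw [if_neg hmem] at hbump2
        omega
    have hinv' : ∀ k, ((cnt.insert o (cnt.getD o 0 - 1)).insert t ((cnt.insert o (cnt.getD o 0 - 1)).getD t 0 + 1)).getD k 0
        = ((winI discount ((a + 1) - 1)).count k : Int) := by
      intro k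
      have : (a + 1) - 1 = a := by omega
      rw [this, hWB, PySem.Dict.getD_insert]
      by_cases hkt : k = t
      · subst hkt; rw [hmido t]; simp [List.count_append]
      · simp only [hkt, if_false]
        rw [hmido k]
        have ht' : ¬ t = k := Ne.symm hkt
        simp [List.count_append, List.count_singleton, hkt, ht']
    have hsat' : (if needs.get? t = some ((cnt.insert o (cnt.getD o 0 - 1)).getD t 0 + 1)
          then (if needs.get? o = some ((cnt.getD o 0 - 1) + 1) then sat - 1 else sat) + 1
          else (if needs.get? o = some ((cnt.getD o 0 - 1) + 1) then sat - 1 else sat))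
        = (satW needs (winI discount ((a + 1) - 1)) : Int) := by
      rw [hsat2]
      have haa : (a + 1) - 1 = a := by omega
      rw [haa]
    have hrec := ih (a + 1) (by omega) hab' _ _
        (if ((if needs.get? t = some ((cnt.insert o (cnt.getD o 0 - 1)).getD t 0 + 1)
          then (if needs.get? o = some ((cnt.getD o 0 - 1) + 1) then sat - 1 else sat) + 1
          else (if needs.get? o = some ((cnt.getD o 0 - 1) + 1) then sat - 1 else sat)) = total)
         then ans + 1 else ans) hinv' hsat'
    rw [hrec]
    have hgood : ((if needs.get? t = some ((cnt.insert o (cnt.getD o 0 - 1)).getD t 0 + 1)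
          then (if needs.get? o = some ((cnt.getD o 0 - 1) + 1) then sat - 1 else sat) + 1
          else (if needs.get? o = some ((cnt.getD o 0 - 1) + 1) then sat - 1 else sat)) = total)
        ↔ (goodDay needs discount a = true) := by
      rw [hsat2, htot]
      unfold goodDay
      rw [beq_iff_eq]
      constructor
      · intro h; exact_mod_cast h
      · intro h; exact_mod_cast h
    by_cases hgd : goodDay needs discount a = true
    · rw [if_pos (hgood.mpr hgd), hgd]
      simp
      omega
    · rw [if_neg (fun hh => hgd (hgood.mp hh))]
      simp only [Bool.not_eq_true] at hgd
      rw [hgd]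
      simp

theorem a_closed (want : List String) (number : List Int) (discount : List String) :
    solution want number discount =
      (PySem.List.pyRange 0 ((discount.length : Int) - 9) 1).foldl
        (fun answer day =>
          if ((PySem.Set.ofList (((PySem.List.pyRange day (day + 10) 1).foldl
                (fun nd i => stepA nd (PySem.List.pyGetD discount i "")) (needsOf want number)).values)).length = 1
              ∧ (0:Int) ∈ PySem.Set.ofList (((PySem.List.pyRange day (day + 10) 1).foldl
                (fun nd i => stepA nd (PySem.List.pyGetD discount i "")) (needsOf want number)).values))
          then answer + 1 else answer) 0 := rfl

theorem alt_closed (want : List String) (number : List Int) (discount : List String) :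
    solution_alt want number discount =
      if (discount.length : Int) < 10 then 0
      else
        ((PySem.List.pyRange 1 ((discount.length : Int) - 9) 1).foldl
            (stepM (needsOf want number) ((needsOf want number).size : Int) discount)
            (((PySem.List.slice discount none (some 10)).foldl (stepB (needsOf want number))
                (PySem.Dict.empty, ((needsOf want number).values.countP (fun v => v == 0) : Int))),
             (if ((PySem.List.slice discount none (some 10)).foldl (stepB (needsOf want number))
                  (PySem.Dict.empty, ((needsOf want number).values.countP (fun v => v == 0) : Int))).2
                 = ((needsOf want number).size : Int) then 1 else 0))).2 := rfl

theorem good_iff (want : List String) (number : List Int) (discount : List String)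
    (hw : want ≠ []) (hn : number ≠ []) (day : Int) :
    ((PySem.Set.ofList (((winI discount day).foldl stepA (needsOf want number)).values)).length = 1
      ∧ (0:Int) ∈ PySem.Set.ofList (((winI discount day).foldl stepA (needsOf want number)).values))
    ↔ (goodDay (needsOf want number) discount day = true) := by
  rw [windowA_iff _ (needs_keys_nodup want number) _]
  unfold goodDay
  rw [beq_iff_eq]
  constructor
  · rintro ⟨-, hall⟩
    unfold satW
    rw [List.countP_eq_length]
    intro kv hkv
    exact decide_eq_true (hall kv hkv)
  · intro hlen
    refine ⟨needs_keys_ne want number hw hn, ?_⟩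
    intro kv hkv
    unfold satW at hlen
    rw [List.countP_eq_length] at hlen
    exact of_decide_eq_true (hlen kv hkv)

theorem A_eq (want : List String) (number : List Int) (discount : List String)
    (hw : want ≠ []) (hn : number ≠ []) :
    solution want number discount
      = 0 + (((PySem.List.pyRange 0 ((discount.length : Int) - 9) 1).countP
          (goodDay (needsOf want number) discount) : Nat) : Int) := by
  rw [a_closed]
  refine Eq.trans ?_ (PySem.List.foldl_if_add_one _ _ _)
  apply PySem.List.foldl_congr_mem
  · intro acc day hday
    obtain ⟨hd0, hd1⟩ := PySem.List.mem_pyRange_one.mp hday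
    have hd10 : day + 10 ≤ (discount.length : Int) := by omega
    have hfold : (PySem.List.pyRange day (day + 10) 1).foldl
          (fun nd i => stepA nd (PySem.List.pyGetD discount i "")) (needsOf want number)
        = (winI discount day).foldl stepA (needsOf want number) := by
      rw [← mapWin discount day hd0 hd10, List.foldl_map]
    rw [hfold]
    exact if_congr (good_iff want number discount hw hn day) rfl rfl

theorem sat0_eq (want : List String) (number : List Int) :
    (((needsOf want number).values.countP (fun v => v == 0) : Nat) : Int)
      = ((satW (needsOf want number) [] : Nat) : Int) := by
  unfold satW
  unfold PySem.Dict.values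
  rw [List.countP_map]
  congr 1
  apply List.countP_congr
  intro kv _
  simp only [Function.comp_apply, List.count_nil, Nat.cast_zero, beq_iff_eq]
  by_cases h : kv.2 = 0
  · simp [h]
  · simp [h]; omega

theorem B_eq (want : List String) (number : List Int) (discount : List String)
    (hw : want ≠ []) (hn : number ≠ []) :
    solution_alt want number discount
      = 0 + (((PySem.List.pyRange 0 ((discount.length : Int) - 9) 1).countP
          (goodDay (needsOf want number) discount) : Nat) : Int) := by
  rw [alt_closed]
  by_cases hlen : (discount.length : Int) < 10
  · rw [if_pos hlen, PySem.List.pyRange_one_eq_nil (by omega)]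
    simp
  · rw [if_neg hlen]
    have h10 : 10 ≤ (discount.length : Int) := by omega
    have hslice : PySem.List.slice discount none (some 10) = winI discount 0 := by
      rw [PySem.List.slice_to (xs := discount) (b := 10) (by norm_num)]
      unfold winI
      rfl
    have hnd := needs_keys_nodup want number
    have hinit := initfold (needsOf want number) hnd (winI discount 0) [] PySem.Dict.empty
        (((needsOf want number).values.countP (fun v => v == 0) : Nat) : Int)
        (by intro k; simp [PySem.Dict.getD_empty]) (sat0_eq want number)
    rw [hslice]
    have hm : (1 : Int) + (((discount.length : Int) - 10).toNat : Int) = (discount.length : Int) - 9 := by omega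
    have hloop := mainloop (needsOf want number) hnd discount ((needsOf want number).size : Int) rfl
        ((discount.length : Int) - 10).toNat 1 (by omega) hm
        _ _
        (if ((winI discount 0).foldl (stepB (needsOf want number))
              (PySem.Dict.empty, (((needsOf want number).values.countP (fun v => v == 0) : Nat) : Int))).2
            = ((needsOf want number).size : Int) then 1 else 0)
        (by intro k
            have := (hinit).1 k
            simpa using this)
        (by have := (hinit).2
            simpa using this)
    rw [hloop]
    have hcons : PySem.List.pyRange 0 ((discount.length : Int) - 9) 1
        = 0 :: PySem.List.pyRange 1 ((discount.length : Int) - 9) 1 := by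
      have := PySem.List.pyRange_one_cons (a := 0) (b := (discount.length : Int) - 9) (by omega)
      simpa using this
    rw [hcons, List.countP_cons]
    have hginit : (((winI discount 0).foldl (stepB (needsOf want number))
          (PySem.Dict.empty, (((needsOf want number).values.countP (fun v => v == 0) : Nat) : Int))).2
            = ((needsOf want number).size : Int))
        ↔ (goodDay (needsOf want number) discount 0 = true) := by
      rw [(hinit).2]
      unfold goodDay
      rw [beq_iff_eq]
      have hsz : ((needsOf want number).size : Int) = ((needsOf want number).items.length : Int) := rfl
      rw [hsz]
      simp only [List.nil_append]
      constructor
      · intro h; exact_mod_cast h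
      · intro h; exact_mod_cast h
    by_cases hg : goodDay (needsOf want number) discount 0 = true
    · rw [if_pos (hginit.mpr hg), hg]
      simp
      omega
    · rw [if_neg (fun hh => hg (hginit.mp hh))]
      simp only [Bool.not_eq_true] at hg
      rw [hg]
      simp

-- ===== VERDICT (by name: the statement is the Claim_ definition above) =====
theorem solution_spec : Claim_equal_solution := by
  intro want number discount _ hpre
  unfold Spec_solution
  rcases hpre with ⟨hw, hn⟩ | hshort
  · rw [A_eq want number discount hw hn, B_eq want number discount hw hn]
  · rw [a_closed, alt_closed, if_pos (by exact_mod_cast hshort)]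
    rw [PySem.List.pyRange_one_eq_nil (by omega)]
    rfl
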